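-- pv_equiv track=rewrite | github.com/mrunalhirve12/Python_CTCI-practise | Companies/Akamai/Reverse words in a string.py | reverseLettersWords
-- ===== SOURCE A (Python) =====
-- def reverseLettersWords(words):
--     words = words.split()
--     res = []
--     for i in range(len(words)-1, -1, -1):
--         word = list(words[i])
--         i = 0
--         j = len(word)-1
--         while i < j:
--             word[i], word[j] = word[j], word[i]
--             i += 1
--             j -= 1
--         word = "".join(word)
--         res.append(word)
--     return " ".join(res)
-- ===== SOURCE B (Python) =====
-- def reverseLettersWords(words):
--     # Normalize whitespace, then one global reversal flips both the word
--     # order and each word's letters at once.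
--     s = " ".join(words.split())
--     return s[::-1]
-- ===== Notes on version B (the rewrite author's own statement) =====
-- stated objective: simpler
-- what changed: Replaces the reverse index loop plus per-word in-place character-swap loop with whitespace normalization (join of split on a single space) followed by one global slice reversal, exploiting that reversing the normalized string reverses word order and letters simultaneously.
import Mathlib
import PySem

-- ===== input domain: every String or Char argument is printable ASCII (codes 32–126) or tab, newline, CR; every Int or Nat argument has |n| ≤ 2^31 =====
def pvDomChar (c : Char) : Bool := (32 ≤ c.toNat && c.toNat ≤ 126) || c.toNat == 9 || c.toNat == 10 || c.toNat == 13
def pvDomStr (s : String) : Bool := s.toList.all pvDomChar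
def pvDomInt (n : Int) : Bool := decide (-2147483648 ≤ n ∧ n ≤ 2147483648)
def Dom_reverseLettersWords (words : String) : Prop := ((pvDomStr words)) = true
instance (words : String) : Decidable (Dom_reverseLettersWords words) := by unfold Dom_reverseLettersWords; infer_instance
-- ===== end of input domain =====

-- B replaces A's reverse index loop plus per-word character-swap loop with
-- whitespace normalization followed by one global slice reversal (objective: simpler).

-- ===== PORT A =====
-- A's inner `while i < j` swap loop; Python's i and j stay nonnegative and in
-- range throughout (i starts at 0, j at len(word)-1, the loop stops once i ≥ j),
-- so Nat indices with in-range List.set/getD are exact here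
def pvSwapLoop (word : List Char) (i j : Nat) : List Char :=
  if i < j then
    pvSwapLoop ((word.set i (word.getD j ' ')).set j (word.getD i ' ')) (i + 1) (j - 1)
  else word
termination_by j - i
decreasing_by omega

-- body of A's outer loop for one word: word = list(words[i]); …; "".join(word)
def pvRevWord (w : String) : String :=
  let word := w.toList
  String.ofList (pvSwapLoop word 0 (word.length - 1))

def reverseLettersWords (words : String) : String :=
  let ws := PySem.Str.split₀ words
  let res := (PySem.List.pyRange ((ws.length : Int) - 1) (-1) (-1)).foldl
    (fun res i => res ++ [pvRevWord (PySem.List.pyGetD ws i "")]) []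
  PySem.Str.join " " res

-- ===== PORT B =====
def reverseLettersWords_alt (words : String) : String :=
  let s := PySem.Str.join " " (PySem.Str.split₀ words)
  (PySem.Str.slice? s none none (-1)).getD ""

-- ===== PRECONDITION & SPEC =====
def Spec_reverseLettersWords (words : String) (out : String) : Prop := out = reverseLettersWords_alt words
instance (words : String) (out : String) : Decidable (Spec_reverseLettersWords words out) := by unfold Spec_reverseLettersWords; infer_instance

-- ===== CLAIM (what is proved, stated in full; the proofs are below) =====
def Claim_equal_reverseLettersWords : Prop := ∀ (words : String), Dom_reverseLettersWords words → Spec_reverseLettersWords words (reverseLettersWords words)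

-- ===== LEMMAS AND PROOFS =====

theorem getD_set' (l : List Char) (p q : Nat) (a : Char) (h : q < l.length) :
    (l.set p a).getD q ' ' = if p = q then a else l.getD q ' ' := by
  rw [List.getD_eq_getElem?_getD, List.getElem?_set]
  split_ifs with h1 h2
  · rfl
  · omega
  · rw [List.getD_eq_getElem?_getD]

theorem pvSwapLoop_length (i j : Nat) (w : List Char) :
    (pvSwapLoop w i j).length = w.length := by
  fun_induction pvSwapLoop with
  | case1 w i j h ih => simpa using ih
  | case2 w i j h => rfl

theorem pvSwapLoop_getD (w : List Char) (i j : Nat)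
    (hj : j < w.length) (k : Nat) (hk : k < w.length) :
    (pvSwapLoop w i j).getD k ' '
      = if i ≤ k ∧ k ≤ j then w.getD (i + j - k) ' ' else w.getD k ' ' := by
  fun_induction pvSwapLoop with
  | case2 w i j h =>
      split
      · next hc => have : k = i ∧ k = j := by omega
                   obtain ⟨rfl, h2⟩ := this
                   congr 1; omega
      · rfl
  | case1 w i j h ih =>
      have hlen : ((w.set i (w.getD j ' ')).set j (w.getD i ' ')).length = w.length := by simp
      have hij : i < w.length := by omega
      rw [ih (by omega) (by omega)]
      have hw' : ∀ m, m < w.length →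
          ((w.set i (w.getD j ' ')).set j (w.getD i ' ')).getD m ' '
            = if m = j then w.getD i ' ' else if m = i then w.getD j ' ' else w.getD m ' ' := by
        intro m hm
        rw [getD_set' _ _ _ _ (by simpa using hm), getD_set' _ _ _ _ hm]
        split_ifs <;> first | rfl | omega
      by_cases h1 : i + 1 ≤ k ∧ k ≤ j - 1
      · rw [if_pos h1, if_pos (by omega : i ≤ k ∧ k ≤ j)]
        rw [hw' _ (by omega)]
        rw [if_neg (by omega), if_neg (by omega)]
        congr 1; omega
      · rw [if_neg h1]
        rcases Nat.lt_or_ge k i with hki | hki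
        · rw [hw' _ hk, if_neg (by omega), if_neg (by omega), if_neg (by omega)]
        · by_cases hkeq : k = i
          · subst hkeq
            rw [hw' _ hk, if_neg (by omega), if_pos rfl, if_pos (by omega)]
            congr 1; omega
          · by_cases hkj : k = j
            · subst hkj
              rw [hw' _ hk, if_pos rfl, if_pos (by omega)]
              congr 1; omega
            · rw [hw' _ hk, if_neg hkj, if_neg (by omega), if_neg (by omega)]

theorem pvSwapLoop_reverse (w : List Char) :
    pvSwapLoop w 0 (w.length - 1) = w.reverse := by
  rcases w with _ | ⟨c, cs⟩
  · rw [pvSwapLoop]; simp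
  · apply List.ext_getElem
    · simp [pvSwapLoop_length]
    · intro k h1 h2
      have hk : k < (c :: cs).length := by
        simpa [pvSwapLoop_length] using h1
      have hres := pvSwapLoop_getD (c :: cs) 0 ((c :: cs).length - 1) (by simp) k hk
      rw [if_pos (by simp only [List.length_cons] at hk ⊢; omega)] at hres
      rw [← List.getD_eq_getElem _ ' ' h1, hres, List.getElem_reverse,
          List.getD_eq_getElem _ ' ' (by simp only [List.length_cons] at hk ⊢; omega)]
      congr 1
      omega

theorem pvRevWord_eq (w : String) :
    pvRevWord w = String.ofList w.toList.reverse := by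
  show String.ofList (pvSwapLoop w.toList 0 (w.toList.length - 1))
      = String.ofList w.toList.reverse
  rw [pvSwapLoop_reverse]

theorem chars_join_snoc (l : List (List Char)) (a : List Char) (h : l ≠ []) :
    PySem.Chars.join [' '] (l ++ [a]) = PySem.Chars.join [' '] l ++ [' '] ++ a := by
  induction l with
  | nil => exact absurd rfl h
  | cons x t ih =>
    rcases t with _ | ⟨y, t'⟩
    · simp [PySem.Chars.join_cons_cons, PySem.Chars.join_singleton]
    · simp only [List.cons_append] at ih ⊢
      rw [PySem.Chars.join_cons_cons, ih (by simp), PySem.Chars.join_cons_cons]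
      simp

theorem chars_join_reverse (ls : List (List Char)) :
    (PySem.Chars.join [' '] ls).reverse
      = PySem.Chars.join [' '] ((ls.map List.reverse).reverse) := by
  induction ls with
  | nil => simp [PySem.Chars.join_nil]
  | cons x t ih =>
    rcases t with _ | ⟨y, t'⟩
    · simp [PySem.Chars.join_singleton]
    · rw [PySem.Chars.join_cons_cons, List.map_cons, List.reverse_cons,
          chars_join_snoc _ _ (by simp), ← ih]
      simp

theorem key_join (ws : List String) :
    PySem.Str.join " " ((PySem.List.pyRange ((ws.length : Int) - 1) (-1) (-1)).foldl
        (fun res i => res ++ [pvRevWord (PySem.List.pyGetD ws i "")]) [])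
      = String.ofList (PySem.Str.join " " ws).toList.reverse := by
  have hrange : PySem.List.pyRange ((ws.length : Int) - 1) (-1) (-1)
      = (PySem.List.pyRange 0 (ws.length : Int)).reverse := by
    rw [PySem.List.pyRange_neg_one_eq_reverse]
    norm_num
  rw [hrange, PySem.List.foldl_append_singleton_eq_map, List.nil_append, List.map_reverse]
  have hmap : (PySem.List.pyRange 0 (ws.length : Int)).map
        (fun i => pvRevWord (PySem.List.pyGetD ws i ""))
      = ws.map pvRevWord := by
    conv_rhs => rw [← PySem.List.map_pyGetD_pyRange_zero ws ""]
    rw [List.map_map]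
    rfl
  rw [hmap, ← String.toList_inj]
  have hw : ∀ w : String, (pvRevWord w).toList = w.toList.reverse := by
    intro w
    rw [pvRevWord_eq]
    simp
  simp [PySem.Str.toList_join, List.map_reverse, List.map_map, Function.comp_def, hw,
        chars_join_reverse]

-- ===== VERDICT (by name: the statement is the Claim_ definition above) =====
theorem reverseLettersWords_spec : Claim_equal_reverseLettersWords := by
  intro words _
  show reverseLettersWords words = reverseLettersWords_alt words
  simp only [reverseLettersWords, reverseLettersWords_alt,
             PySem.Str.slice?_none_none_neg_one, Option.getD_some]
  exact key_join _
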